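-- pv_equiv track=rewrite | github.com/dede6giu/huffman-algorithm-py | src/hufffunc.py | obtain_denctable
-- ===== SOURCE A (Python) =====
-- def obtain_denctable(encStr: str) -> dict[str, str]:
--     aux = encStr.find("'}'") # escaping having '}' present in the table
--     if aux == -1:
--         tableEnd: int = encStr.find("}")
--     else:
--         tableEnd: int = encStr.find("}", aux+3)
--     tableStr: str = encStr[:tableEnd]
--     sizeTable: int = len(tableStr)
--     i: int = 0
--     denctable: dict[str, str] = {}
--     while i < sizeTable:
--         if tableStr[i] == "'":
--             i += 1
--             aux2 = ""
--             while tableStr[i] != "'":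
--                 aux2 += tableStr[i]
--                 i += 1
--             i += 3
--             aux = tableStr[i]
--             i += 2
--             denctable[aux2] = aux
--             continue
--         i += 1
--     return denctable
-- ===== SOURCE B (Python) =====
-- import re
--
-- def obtain_denctable(encStr: str) -> dict[str, str]:
--     aux = encStr.find("'}'")  # escaping having '}' present in the table (kept verbatim from A)
--     if aux == -1:
--         tableEnd = encStr.find("}")
--     else:
--         tableEnd = encStr.find("}", aux + 3)
--     denctable: dict[str, str] = {}
--     for key, value in re.findall(r"'([^']*)':'(.)'", encStr[:tableEnd], re.DOTALL):
--         denctable[key] = value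
--     return denctable
-- ===== Notes on version B (the rewrite author's own statement) =====
-- stated objective: idiomatic
-- what changed: The manual index-walking while-loop with hand-maintained cursor arithmetic is replaced by a single re.findall over the pattern '([^']*)':'(.)' (DOTALL) on the same table prefix, assigning each matched key/value pair into the dict.
-- outside the precondition, e.g. on obtain_denctable("'ab'xyzq"): A returns {'ab': 'z'}, B returns {}
import Mathlib
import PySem

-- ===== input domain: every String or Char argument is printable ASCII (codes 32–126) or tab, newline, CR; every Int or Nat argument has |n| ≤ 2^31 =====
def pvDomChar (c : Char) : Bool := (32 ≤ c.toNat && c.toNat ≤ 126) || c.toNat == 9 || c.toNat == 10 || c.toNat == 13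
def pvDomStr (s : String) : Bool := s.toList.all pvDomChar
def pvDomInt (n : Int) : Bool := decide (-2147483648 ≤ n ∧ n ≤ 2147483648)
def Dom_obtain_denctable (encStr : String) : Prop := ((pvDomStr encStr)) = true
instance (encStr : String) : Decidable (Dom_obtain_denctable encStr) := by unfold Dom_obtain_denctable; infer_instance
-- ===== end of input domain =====

-- B replaces A's manual index-walking character parser by an idiomatic regex scan
-- (re.findall over the table string); the table-end computation is kept verbatim.

-- ===== PORT A =====

-- inner while loop of A: starting at index i, accumulate chars of the key until a "'" is met;
-- returns (key chars, number of key chars read, so the closing quote sits at i + count).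
-- If the quote is missing Python raises IndexError; the port then just stops (excluded by Pre_).
-- (the cursor only ever moves forward from 0, so plain Nat indexing is exact for tableStr[i].)
def pvInnerA (s : List Char) (i : Nat) (acc : List Char) : List Char × Nat :=
  if h : i < s.length then
    if s[i] = '\'' then (acc, 0)
    else
      let r := pvInnerA s (i + 1) (acc ++ [s[i]])
      (r.1, r.2 + 1)
  else (acc, 0)
termination_by s.length - i
decreasing_by exact Nat.sub_succ_lt_self s.length i h

-- outer while loop of A: the closing quote is at i + 1 + n, A reads the value at +3 from it
-- and resumes at +5 from it
def pvLoopA (s : List Char) (i : Nat) (d : PySem.Dict String String) : PySem.Dict String String :=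
  if h : i < s.length then
    if s[i] = '\'' then
      match pvInnerA s (i + 1) [] with
      | (key, n) =>
        match s[i + 1 + n + 3]? with
        | none => d    -- Python raises IndexError here (excluded by Pre_)
        | some v => pvLoopA s (i + 1 + n + 5) (d.insert (String.ofList key) (String.ofList [v]))
    else pvLoopA s (i + 1) d
  else d
termination_by s.length - i
decreasing_by
  · exact Nat.sub_lt_sub_left h (Nat.lt_of_lt_of_le (Nat.lt_succ_self i)
      (Nat.le_trans (Nat.le_add_right (i + 1) n) (Nat.le_add_right (i + 1 + n) 5)))
  · exact Nat.sub_succ_lt_self s.length i h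

def obtain_denctable (encStr : String) : List (String × String) :=
  let aux := PySem.Str.find encStr "'}'"
  let tableEnd : Int := if aux = -1 then PySem.Str.find encStr "}"
                        else PySem.Str.findFrom encStr "}" (aux + 3) none
  let tableStr := PySem.List.slice encStr.toList none (some tableEnd)
  (pvLoopA tableStr 0 PySem.Dict.empty).items

-- ===== PORT B =====

-- regex component "([^']*)'": the key group and its length, so the closing quote sits at
-- i + length (none = no closing quote, i.e. the regex cannot match at this start position)
def pvSpanKey (s : List Char) (i : Nat) (acc : List Char) : Option (List Char × Nat) :=
  if h : i < s.length then
    if s[i] = '\'' then some (acc, 0)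
    else
      match pvSpanKey s (i + 1) (acc ++ [s[i]]) with
      | none => none
      | some (key, n) => some (key, n + 1)
  else none
termination_by s.length - i
decreasing_by exact Nat.sub_succ_lt_self s.length i h

-- attempt to match the regex '([^']*)':'(.)' at position pos; on success returns
-- (key group, value group, length of the key — the whole match spans pos .. pos + 6 + n)
def pvTryMatch (s : List Char) (pos : Nat) : Option (List Char × Char × Nat) :=
  if s[pos]? = some '\'' then
    match pvSpanKey s (pos + 1) [] with
    | none => none
    | some (key, n) =>
      if s[pos + 1 + n + 1]? = some ':' ∧ s[pos + 1 + n + 2]? = some '\'' then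
        match s[pos + 1 + n + 3]? with
        | none => none
        | some v => if s[pos + 1 + n + 4]? = some '\'' then some (key, v, n) else none
      else none
  else none

-- the scan of re.findall: try a match at each position, resume after each match
def pvScanB (s : List Char) (pos : Nat) (d : PySem.Dict String String) : PySem.Dict String String :=
  if hp : pos < s.length then
    match pvTryMatch s pos with
    | some (key, v, n) => pvScanB s (pos + 6 + n) (d.insert (String.ofList key) (String.ofList [v]))
    | none => pvScanB s (pos + 1) d
  else d
termination_by s.length - pos
decreasing_by
  · exact Nat.sub_lt_sub_left hp (Nat.lt_of_lt_of_le (Nat.lt_succ_self pos)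
      (Nat.le_trans (Nat.add_le_add_left (by decide : 1 ≤ 6) pos) (Nat.le_add_right (pos + 6) n)))
  · exact Nat.sub_succ_lt_self s.length pos hp

def obtain_denctable_alt (encStr : String) : List (String × String) :=
  let aux := PySem.Str.find encStr "'}'"
  let tableEnd : Int := if aux = -1 then PySem.Str.find encStr "}"
                        else PySem.Str.findFrom encStr "}" (aux + 3) none
  let tableStr := PySem.List.slice encStr.toList none (some tableEnd)
  (pvScanB tableStr 0 PySem.Dict.empty).items

-- ===== PRECONDITION & SPEC =====

-- well-formed table grammar, as a finite automaton run left to right over the chars: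
-- state 0 = filler (any non-quote chars; a quote opens an entry), 1 = inside the key,
-- 2/3 = expect the ":'" after the key, 4 = the one value char (anything), 5 = expect the
-- closing quote, 6 = dead.  A table is well formed iff the run ends back in state 0.
def pvStep (st : Nat) (c : Char) : Nat :=
  match st with
  | 0 => if c = '\'' then 1 else 0
  | 1 => if c = '\'' then 2 else 1
  | 2 => if c = ':' then 3 else 6
  | 3 => if c = '\'' then 4 else 6
  | 4 => 5
  | 5 => if c = '\'' then 0 else 6
  | _ => 6

def pvRun (st : Nat) (l : List Char) : Nat := l.foldl pvStep st

def pvValidChars (l : List Char) : Bool := pvRun 0 l == 0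

-- the table prefix of the input, as both programs cut it out
def pvTableChars (encStr : String) : List Char :=
  let aux := PySem.Str.find encStr "'}'"
  let tableEnd : Int := if aux = -1 then PySem.Str.find encStr "}"
                        else PySem.Str.findFrom encStr "}" (aux + 3) none
  PySem.List.slice encStr.toList none (some tableEnd)

-- Pre_ excludes inputs whose table part is not a well-formed 'key':'v' table: there A either
-- raises IndexError or returns accidental pairs read off blind positional skips, a corner
-- value no caller of this Huffman-table parser would specify.
def Pre_obtain_denctable (encStr : String) : Prop :=
  pvValidChars (pvTableChars encStr) = true
instance (encStr : String) : Decidable (Pre_obtain_denctable encStr) := by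
  unfold Pre_obtain_denctable; infer_instance

def pvWitness_obtain_denctable : String := "{'a':'0','b':'1'}"

def Spec_obtain_denctable (encStr : String) (out : List (String × String)) : Prop :=
  out = obtain_denctable_alt encStr
instance (encStr : String) (out : List (String × String)) : Decidable (Spec_obtain_denctable encStr out) := by
  unfold Spec_obtain_denctable; infer_instance

-- ===== CLAIM (what is proved, stated in full; the proofs are below) =====
def Claim_equal_obtain_denctable : Prop := ∀ (encStr : String), Dom_obtain_denctable encStr → Pre_obtain_denctable encStr → Spec_obtain_denctable encStr (obtain_denctable encStr)

-- ===== LEMMAS AND PROOFS =====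

theorem pvRun_cons (st : Nat) (c : Char) (r : List Char) :
    pvRun st (c :: r) = pvRun (pvStep st c) r := rfl

theorem pvRun_dead (l : List Char) : pvRun 6 l = 6 := by
  induction l with
  | nil => rfl
  | cons c r ih => rw [pvRun_cons]; exact ih

-- a run that reaches state 2 and accepts must read exactly ":'v'" and then a valid tail
theorem pvSep_shape (r : List Char) (h : pvRun 2 r = 0) :
    ∃ v r2, r = ':' :: '\'' :: v :: '\'' :: r2 ∧ pvRun 0 r2 = 0 := by
  rcases r with _ | ⟨a, r1⟩
  · simp [pvRun] at h
  rw [pvRun_cons] at h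
  by_cases ha : a = ':'
  case neg => simp only [pvStep, if_neg ha] at h; rw [pvRun_dead] at h; omega
  simp only [pvStep, if_pos ha] at h
  rcases r1 with _ | ⟨b, r2⟩
  · simp [pvRun] at h
  rw [pvRun_cons] at h
  by_cases hb : b = '\''
  case neg => simp only [pvStep, if_neg hb] at h; rw [pvRun_dead] at h; omega
  simp only [pvStep, if_pos hb] at h
  rcases r2 with _ | ⟨v, r3⟩
  · simp [pvRun] at h
  rw [pvRun_cons] at h
  simp only [pvStep] at h
  rcases r3 with _ | ⟨e, r4⟩
  · simp [pvRun] at h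
  rw [pvRun_cons] at h
  by_cases he : e = '\''
  case neg => simp only [pvStep, if_neg he] at h; rw [pvRun_dead] at h; omega
  simp only [pvStep, if_pos he] at h
  exact ⟨v, r4, by rw [ha, hb, he], h⟩

-- On a valid entry suffix, A's inner loop and B's key span agree and the five regex
-- positions after the key hold the expected characters.
theorem pv_entry (s : List Char) (i : Nat) (acc : List Char)
    (hv : pvRun 1 (s.drop i) = 0) :
    ∃ key n v, pvInnerA s i acc = (acc ++ key, n) ∧ pvSpanKey s i acc = some (acc ++ key, n) ∧
      s[i + n]? = some '\'' ∧ s[i + n + 1]? = some ':' ∧ s[i + n + 2]? = some '\'' ∧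
      s[i + n + 3]? = some v ∧ s[i + n + 4]? = some '\'' ∧
      pvRun 0 (s.drop (i + n + 5)) = 0 := by
  fun_induction pvInnerA s i acc with
  | case1 i acc h hq =>
    rw [List.drop_eq_getElem_cons h, pvRun_cons] at hv
    simp only [pvStep, if_pos hq] at hv
    obtain ⟨v, r2, h01, hr2⟩ := pvSep_shape _ hv
    refine ⟨[], 0, v, by simp, by unfold pvSpanKey; simp [h, hq], ?_, ?_, ?_, ?_, ?_, ?_⟩
    · show s[i]? = some '\''
      rw [List.getElem?_eq_getElem h, hq]
    · show s[i + 1 + 0]? = some ':'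
      rw [← @List.getElem?_drop Char s (i + 1) 0, h01]; rfl
    · show s[i + 1 + 1]? = some '\''
      rw [← @List.getElem?_drop Char s (i + 1) 1, h01]; rfl
    · show s[i + 1 + 2]? = some v
      rw [← @List.getElem?_drop Char s (i + 1) 2, h01]; rfl
    · show s[i + 1 + 3]? = some '\''
      rw [← @List.getElem?_drop Char s (i + 1) 3, h01]; rfl
    · show pvRun 0 (s.drop (i + 1 + 4)) = 0
      have hdd : List.drop (i + 1 + 4) s = r2 := by
        rw [← @List.drop_drop Char 4 (i + 1) s, h01]; rfl
      rw [hdd]; exact hr2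
  | case2 i acc h hq r ih =>
    rw [List.drop_eq_getElem_cons h, pvRun_cons] at hv
    simp only [pvStep, if_neg hq] at hv
    obtain ⟨key, n', v, e1, e2, p0, p1, p2, p3, p4, pr⟩ := ih hv
    have harith : i + (n' + 1) = i + 1 + n' := by omega
    refine ⟨s[i] :: key, n' + 1, v, ?_, ?_, ?_, ?_, ?_, ?_, ?_, ?_⟩
    · rw [show r = pvInnerA s (i + 1) (acc ++ [s[i]]) from rfl, e1]; simp
    · unfold pvSpanKey
      simp only [dif_pos h, if_neg hq]
      rw [e2]; simp
    · rw [harith]; exact p0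
    · rw [harith]; exact p1
    · rw [harith]; exact p2
    · rw [harith]; exact p3
    · rw [harith]; exact p4
    · rw [harith]; exact pr
  | case3 i acc h =>
    rw [List.drop_eq_nil_of_le (by omega)] at hv
    simp [pvRun] at hv

-- one step of B's scan, in the three shapes pv_main needs
theorem pvScanB_some (s : List Char) (pos : Nat) (d : PySem.Dict String String)
    (key : List Char) (v : Char) (n : Nat) (hp : pos < s.length)
    (hm : pvTryMatch s pos = some (key, v, n)) :
    pvScanB s pos d = pvScanB s (pos + 6 + n) (d.insert (String.ofList key) (String.ofList [v])) := by
  rw [pvScanB.eq_def, dif_pos hp, hm]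

theorem pvScanB_none (s : List Char) (pos : Nat) (d : PySem.Dict String String)
    (hp : pos < s.length) (hm : pvTryMatch s pos = none) :
    pvScanB s pos d = pvScanB s (pos + 1) d := by
  rw [pvScanB.eq_def, dif_pos hp, hm]

theorem pvScanB_end (s : List Char) (pos : Nat) (d : PySem.Dict String String)
    (hp : ¬ pos < s.length) : pvScanB s pos d = d := by
  unfold pvScanB
  rw [dif_neg hp]

-- the two loops agree on every valid suffix
theorem pv_main (s : List Char) (i : Nat) (d : PySem.Dict String String) :
    pvRun 0 (s.drop i) = 0 → pvLoopA s i d = pvScanB s i d := by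
  fun_induction pvLoopA s i d with
  | case1 i d h hq key n e x =>
    intro hv
    rw [List.drop_eq_getElem_cons h, pvRun_cons] at hv
    simp only [pvStep, if_pos hq] at hv
    obtain ⟨key', n', v', e1, e2, p0, p1, p2, p3, p4, pr⟩ := pv_entry s (i + 1) [] hv
    rw [e] at e1
    simp only [List.nil_append] at e1
    injection e1 with hk hn
    subst hk
    subst hn
    rw [p3] at x
    cases x
  | case2 i d h hq key n e v x ih =>
    intro hv
    rw [List.drop_eq_getElem_cons h, pvRun_cons] at hv
    simp only [pvStep, if_pos hq] at hv
    obtain ⟨key', n', v', e1, e2, p0, p1, p2, p3, p4, pr⟩ := pv_entry s (i + 1) [] hv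
    rw [e] at e1
    simp only [List.nil_append] at e1
    injection e1 with hk hn
    subst hk
    subst hn
    rw [p3] at x
    have hvv := Option.some.inj x
    subst hvv
    simp only [List.nil_append] at e2
    have hi : s[i]? = some '\'' := by rw [List.getElem?_eq_getElem h, hq]
    have hm : pvTryMatch s i = some (key, v', n) := by
      unfold pvTryMatch
      rw [hi, if_pos rfl, e2]
      dsimp only
      rw [if_pos ⟨p1, p2⟩, p3]
      dsimp only
      rw [if_pos p4]
    rw [pvScanB_some s i d key v' n h hm]
    rw [show i + 6 + n = i + 1 + n + 5 by omega]
    exact ih pr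
  | case3 i d h hq ih =>
    intro hv
    rw [List.drop_eq_getElem_cons h, pvRun_cons] at hv
    simp only [pvStep, if_neg hq] at hv
    have hm : pvTryMatch s i = none := by
      unfold pvTryMatch
      rw [if_neg]
      rw [List.getElem?_eq_getElem h]
      simp [hq]
    rw [pvScanB_none s i d h hm]
    exact ih hv
  | case4 i d h =>
    intro _
    exact (pvScanB_end s i d h).symm

-- ===== VERDICT (by name: the statement is the Claim_ definition above) =====
theorem obtain_denctable_spec : Claim_equal_obtain_denctable := by
  intro encStr _ hpre
  unfold Spec_obtain_denctable
  show (pvLoopA (pvTableChars encStr) 0 PySem.Dict.empty).items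
      = (pvScanB (pvTableChars encStr) 0 PySem.Dict.empty).items
  rw [pv_main]
  have : pvValidChars (pvTableChars encStr) = true := hpre
  simpa [pvValidChars] using this
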